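-- pv_equiv track=rewrite | github.com/Mickael03/Projetos | Coursera/Introdução à Ciência da Computação com Python - Parte I/Semana7.py | soma_quadrados
-- ===== SOURCE A (Python) =====
-- def soma_quadrados(hip = 1):
--
--     cat1 = hip - 1
--     cat2 = hip - 1
--     lista = []
--
--     i = 1
--     while i <= cat1:
--         j = 1
--         while j <= cat2:
--             soma = i**2 + j**2
--             if soma == hip**2:
--                 lista.append((i,j))
--             j += 1
--         i += 1
--
--     if len(lista) == 0:
--         return None
--
--     return lista[0]
-- ===== SOURCE B (Python) =====
-- def _isqrt(n):
--     # floor integer square root by binary search (no imports, exact for n >= 0)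
--     lo = 0
--     hi = n + 1
--     while hi - lo > 1:
--         mid = (lo + hi) // 2
--         if mid * mid <= n:
--             lo = mid
--         else:
--             hi = mid
--     return lo
--
-- def soma_quadrados(hip = 1):
--     alvo = hip * hip
--     i = 1
--     while i < hip:
--         resto = alvo - i * i
--         s = _isqrt(resto)
--         if s * s == resto and s >= 1:
--             return (i, s)
--         i += 1
--     return None
-- ===== Notes on version B (the rewrite author's own statement) =====
-- stated objective: faster
-- what changed: Replace the O(hip^2) nested scan over all (i,j) pairs by a single loop over i that tests whether hip^2 - i^2 is a perfect square with a hand-written binary-search integer square root, returning the first hit.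
import Mathlib
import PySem

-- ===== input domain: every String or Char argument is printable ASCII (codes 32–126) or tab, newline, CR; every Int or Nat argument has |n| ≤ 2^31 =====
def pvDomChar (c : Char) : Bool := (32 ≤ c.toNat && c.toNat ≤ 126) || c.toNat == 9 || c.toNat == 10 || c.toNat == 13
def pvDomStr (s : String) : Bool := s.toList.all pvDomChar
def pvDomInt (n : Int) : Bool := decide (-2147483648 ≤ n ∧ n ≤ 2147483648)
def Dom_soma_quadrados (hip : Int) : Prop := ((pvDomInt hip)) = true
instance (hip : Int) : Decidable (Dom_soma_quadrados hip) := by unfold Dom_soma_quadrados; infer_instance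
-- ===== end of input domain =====

-- B replaces A's O(hip^2) double loop by one loop over i with a binary-search integer
-- square root test on hip^2 - i^2 (objective: faster, asymptotic).

-- ===== PORT A =====
def soma_quadrados (hip : Int) : Option (Int × Int) :=
  let cat1 := hip - 1
  let cat2 := hip - 1
  let lista : List (Int × Int) :=
    (PySem.List.pyRange 1 (cat1 + 1) 1).foldl (fun acc i =>
      (PySem.List.pyRange 1 (cat2 + 1) 1).foldl (fun acc2 j =>
        if i ^ 2 + j ^ 2 == hip ^ 2 then acc2 ++ [(i, j)] else acc2) acc) []
  if lista.length == 0 then none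
  else PySem.List.pyGet? lista 0

-- ===== PORT B =====
-- binary-search integer square root, transliteration of Source B's _isqrt
def pvIsqrt (n lo hi : Int) : Int :=
  if _h : hi - lo > 1 then
    let mid := PySem.Int.floordiv (lo + hi) 2
    if mid * mid ≤ n then pvIsqrt n mid hi else pvIsqrt n lo mid
  else lo
termination_by (hi - lo).toNat
decreasing_by
  · have h1 : lo + 1 ≤ PySem.Int.floordiv (lo + hi) 2 := by
      rw [PySem.Int.le_floordiv_iff_mul_le (by omega)]; omega
    omega
  · have h2 : PySem.Int.floordiv (lo + hi) 2 < hi := by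
      rw [PySem.Int.floordiv_lt_iff_lt_mul (by omega)]; omega
    omega

-- while i < hip loop of Source B's soma_quadrados
def pvLoop (hip i : Int) : Option (Int × Int) :=
  if h : i < hip then
    let resto := hip * hip - i * i
    let s := pvIsqrt resto 0 (resto + 1)
    if s * s = resto ∧ 1 ≤ s then some (i, s)
    else pvLoop hip (i + 1)
  else none
termination_by (hip - i).toNat

def soma_quadrados_alt (hip : Int) : Option (Int × Int) :=
  pvLoop hip 1

-- ===== PRECONDITION & SPEC =====
def Spec_soma_quadrados (hip : Int) (out : Option (Int × Int)) : Prop := out = soma_quadrados_alt hip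
instance (hip : Int) (out : Option (Int × Int)) : Decidable (Spec_soma_quadrados hip out) := by unfold Spec_soma_quadrados; infer_instance

-- ===== CLAIM (what is proved, stated in full; the proofs are below) =====
def Claim_equal_soma_quadrados : Prop := ∀ (hip : Int), Dom_soma_quadrados hip → Spec_soma_quadrados hip (soma_quadrados hip)

-- ===== LEMMAS AND PROOFS =====

-- floor-sqrt correctness of the binary search
theorem pvIsqrt_spec (n : Int) : ∀ (lo hi : Int), lo * lo ≤ n → n < hi * hi → lo < hi →
    pvIsqrt n lo hi * pvIsqrt n lo hi ≤ n ∧ n < (pvIsqrt n lo hi + 1) * (pvIsqrt n lo hi + 1) := by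
  intro lo hi
  induction lo, hi using pvIsqrt.induct (n := n) with
  | case1 lo hi h mid hle ih =>
      intro h0 h1 hlh
      have hlt : PySem.Int.floordiv (lo + hi) 2 < hi := by
        rw [PySem.Int.floordiv_lt_iff_lt_mul (by omega)]; omega
      rw [pvIsqrt]
      simp only [dif_pos h]
      have hle' : PySem.Int.floordiv (lo + hi) 2 * PySem.Int.floordiv (lo + hi) 2 ≤ n := hle
      rw [if_pos hle']
      exact ih hle h1 hlt
  | case2 lo hi h mid hgt ih =>
      intro h0 h1 hlh
      have hge : lo + 1 ≤ PySem.Int.floordiv (lo + hi) 2 := by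
        rw [PySem.Int.le_floordiv_iff_mul_le (by omega)]; omega
      rw [pvIsqrt]
      simp only [dif_pos h]
      have hgt' : ¬ PySem.Int.floordiv (lo + hi) 2 * PySem.Int.floordiv (lo + hi) 2 ≤ n := hgt
      rw [if_neg hgt']
      exact ih h0 (lt_of_not_ge hgt') (by omega)
  | case3 lo hi h =>
      intro h0 h1 hlh
      rw [pvIsqrt]
      simp only [dif_neg h]
      have hhi : hi = lo + 1 := by omega
      subst hhi
      exact ⟨h0, h1⟩

theorem filter_eq_singleton {α : Type} {l : List α} {p : α → Bool} {a : α}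
    (hnd : l.Nodup) (ha : a ∈ l) (hpa : p a = true) (huniq : ∀ x ∈ l, p x = true → x = a) :
    l.filter p = [a] := by
  induction l with
  | nil => cases ha
  | cons b l ih =>
      rcases List.mem_cons.mp ha with rfl | hmem
      · have hrest : l.filter p = [] := by
          rw [List.filter_eq_nil_iff]
          intro x hx hpx
          have := huniq x (by simp [hx]) hpx
          subst this
          exact ((List.nodup_cons.mp hnd).1 hx).elim
        simp [List.filter, hpa, hrest]
      · have hb : p b = false := by
          by_contra hb
          have : b = a := huniq b (by simp) (by simpa using hb)
          subst this
          exact ((List.nodup_cons.mp hnd).1 hmem).elim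
        simp only [List.filter, hb]
        exact ih (List.nodup_cons.mp hnd).2 hmem
          (fun x hx hpx => huniq x (by simp [hx]) hpx)

-- the inner body of A for a fixed i, as filter+map
def pvInner (hip i : Int) : List (Int × Int) :=
  ((PySem.List.pyRange 1 hip 1).filter (fun j => i ^ 2 + j ^ 2 == hip ^ 2)).map (fun j => (i, j))

theorem pvLoop_eq (hip : Int) (k : Nat) (i : Int) (hk : (hip - i).toNat = k) (h1 : 1 ≤ i) :
    ((PySem.List.pyRange i hip 1).flatMap (pvInner hip)).head? = pvLoop hip i := by
  induction k generalizing i with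
  | zero =>
      have hge : hip ≤ i := by omega
      rw [PySem.List.pyRange_one_eq_nil hge, pvLoop]
      simp [show ¬ i < hip by omega]
  | succ k ih =>
      have hlt : i < hip := by omega
      rw [PySem.List.pyRange_one_cons hlt, List.flatMap_cons, pvLoop]
      simp only [hlt, dif_pos]
      set resto := hip * hip - i * i with hresto
      set s := pvIsqrt resto 0 (resto + 1) with hs
      have hr0 : 0 < resto := by nlinarith
      have sspec := pvIsqrt_spec resto 0 (resto + 1) (by omega) (by nlinarith) (by omega)
      by_cases hcase : s * s = resto ∧ 1 ≤ s
      · obtain ⟨hss, hs1⟩ := hcase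
        have hshi : s < hip := by nlinarith
        have hfil : (PySem.List.pyRange 1 hip 1).filter
            (fun j => i ^ 2 + j ^ 2 == hip ^ 2) = [s] := by
          apply filter_eq_singleton (PySem.List.nodup_pyRange_one 1 hip)
          · exact PySem.List.mem_pyRange_one.mpr ⟨hs1, hshi⟩
          · simp only [beq_iff_eq]; ring_nf; nlinarith
          · intro x hx hpx
            obtain ⟨hx1, hx2⟩ := PySem.List.mem_pyRange_one.mp hx
            have hxx : x * x = resto := by
              have : i ^ 2 + x ^ 2 = hip ^ 2 := by simpa using hpx
              nlinarith
            nlinarith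
        simp [pvInner, hfil, hss, hs1]
      · have hfil : (PySem.List.pyRange 1 hip 1).filter
            (fun j => i ^ 2 + j ^ 2 == hip ^ 2) = [] := by
          rw [List.filter_eq_nil_iff]
          intro x hx hpx
          obtain ⟨hx1, hx2⟩ := PySem.List.mem_pyRange_one.mp hx
          have hxx : x * x = resto := by
            have : i ^ 2 + x ^ 2 = hip ^ 2 := by simpa using hpx
            nlinarith
          have hsx : s = x := by nlinarith [sspec.1, sspec.2]
          exact hcase ⟨by rw [hsx]; exact hxx, by omega⟩
        simp only [pvInner, hfil, List.map_nil, List.nil_append]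
        rw [if_neg hcase]
        exact ih (i + 1) (by omega) (by omega)

-- ===== VERDICT (by name: the statement is the Claim_ definition above) =====
theorem foldl_append_flatMap {α β : Type} (g : α → List β) :
    ∀ (l : List α) (acc : List β),
      l.foldl (fun acc x => acc ++ g x) acc = acc ++ l.flatMap g
  | [], acc => by simp
  | x :: l, acc => by
      simp only [List.foldl_cons, List.flatMap_cons]
      rw [foldl_append_flatMap g l (acc ++ g x)]
      simp

theorem soma_quadrados_spec : Claim_equal_soma_quadrados := by
  intro hip _
  unfold Spec_soma_quadrados soma_quadrados soma_quadrados_alt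
  simp only [show hip - 1 + 1 = hip from by omega]
  have hstep : ∀ (acc : List (Int × Int)) (i : Int),
      (PySem.List.pyRange 1 hip 1).foldl (fun acc2 j =>
        if i ^ 2 + j ^ 2 == hip ^ 2 then acc2 ++ [(i, j)] else acc2) acc
      = acc ++ pvInner hip i := by
    intro acc i
    exact PySem.List.foldl_append_if (fun j => i ^ 2 + j ^ 2 == hip ^ 2) (fun j => (i, j))
      (PySem.List.pyRange 1 hip 1) acc
  simp only [hstep]
  rw [foldl_append_flatMap, List.nil_append,
    ← pvLoop_eq hip (hip - 1).toNat 1 rfl (le_refl 1)]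
  cases hL : (PySem.List.pyRange 1 hip 1).flatMap (pvInner hip) with
  | nil => simp
  | cons x t => simp
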